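-- pv_equiv track=rewrite | github.com/Gygrus/WDI-ASD-course-Python | Semestr II/Ćwiczenia/Ćwiczenia 7 ASD.py | do_the_magic
-- ===== SOURCE A (Python) =====
-- def partition(tab, p, r):
--     x = tab[r]
--     i = p - 1
--     for j in range(p, r):
--         if tab[j] <= x:
--             i += 1
--             tab[i], tab[j] = tab[j], tab[i]
--     tab[i + 1], tab[r] = tab[r], tab[i + 1]
--     return i + 1
--
-- def qs_iter(tab):
--     stack = []
--     stack.append((0, len(tab) - 1))
--     while len(stack) > 0:
--         p, r = stack.pop()
--         if p < r:
--             q = partition(tab, p, r)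
--             stack.append((p, q - 1))
--             stack.append((q + 1, r))
--
-- def do_the_magic(T):
--     n = len(T)
--     output = []
--     qs_iter(T)
--
--     i = 0
--     while i < n:
--         start = T[i]
--         i += 1
--         stop = start + 1
--
--         while i < n and T[i] <= stop:
--             i += 1
--
--         output.append((start, stop))
--
--     return output
-- ===== SOURCE B (Python) =====
-- def _upper_bound(a, x, lo, hi):
--     # first index j in [lo, hi] with a[j] > x, found by binary search
--     while lo < hi:
--         mid = (lo + hi) // 2
--         if a[mid] <= x:
--             lo = mid + 1
--         else:
--             hi = mid
--     return lo
--
-- def do_the_magic(T):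
--     T.sort()
--     n = len(T)
--     output = []
--     i = 0
--     while i < n:
--         start = T[i]
--         output.append((start, start + 1))
--         i = _upper_bound(T, start + 1, i + 1, n)
--     return output
-- ===== Notes on version B (the rewrite author's own statement) =====
-- stated objective: faster
-- what changed: replaces the hand-written iterative quicksort (explicit stack + Lomuto partition) with the builtin in-place T.sort() and replaces the element-by-element inner skip loop with a hand-written binary search (upper bound of start+1) that jumps directly to the next group's start index
import Mathlib
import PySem

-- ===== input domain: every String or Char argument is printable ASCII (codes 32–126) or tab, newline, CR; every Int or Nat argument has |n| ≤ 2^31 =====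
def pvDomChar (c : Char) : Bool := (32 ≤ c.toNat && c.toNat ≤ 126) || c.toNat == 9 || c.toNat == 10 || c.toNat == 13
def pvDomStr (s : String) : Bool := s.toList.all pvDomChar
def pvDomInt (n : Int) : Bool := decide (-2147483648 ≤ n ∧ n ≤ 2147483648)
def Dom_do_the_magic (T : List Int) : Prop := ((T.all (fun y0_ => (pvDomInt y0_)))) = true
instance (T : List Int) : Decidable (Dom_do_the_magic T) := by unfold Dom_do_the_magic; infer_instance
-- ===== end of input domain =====

-- B sorts with the builtin in-place sort instead of A's hand-written stack quicksort, and
-- finds each group's end by binary search instead of A's element-by-element scan (objective: faster).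
-- Both A and B sort the argument list in place; the equivalence proved here is about the return value.

-- ===== PORT A =====
-- tab[i], tab[j] = tab[j], tab[i]  (indices are provably nonnegative and in range at every call)
def pvSwap (tab : List Int) (i j : Nat) : List Int :=
  let a := tab.getD i 0
  let b := tab.getD j 0
  (tab.set i b).set j a

-- body of partition's for-loop: state (tab, i), loop variable j
def pvPartStep (x : Int) (s : List Int × Int) (j : Int) : List Int × Int :=
  if s.1.getD j.toNat 0 ≤ x then (pvSwap s.1 (s.2 + 1).toNat j.toNat, s.2 + 1) else s

-- partition(tab, p, r): returns the new list together with i + 1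
def pvPartition (tab : List Int) (p r : Int) : List Int × Int :=
  let x := tab.getD r.toNat 0
  let s := (PySem.List.pyRange p r 1).foldl (pvPartStep x) (tab, p - 1)
  (pvSwap s.1 (s.2 + 1).toNat r.toNat, s.2 + 1)

-- qs_iter's while-loop over the explicit stack (push = cons, pop = head: Python appends
-- and pops at the end); the Nat argument is fuel making the recursion structural — the
-- initial fuel 2*len(T)+1 bounds the iteration count (proved below), so it never runs out
def pvQsLoopF : Nat → List (Int × Int) → List Int → List Int
  | 0, _, tab => tab
  | _ + 1, [], tab => tab
  | f + 1, (p, r) :: rest, tab =>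
    if p < r then
      let s := pvPartition tab p r
      pvQsLoopF f ((s.2 + 1, r) :: (p, s.2 - 1) :: rest) s.1
    else pvQsLoopF f rest tab

-- inner while: i += 1 while i < n and T[i] <= stop (fuel (n-i).toNat is exact)
def pvSkipF : Nat → List Int → Int → Int → Int → Int
  | 0, _, _, _, i => i
  | f + 1, tab, n, stop, i =>
    if i < n ∧ tab.getD i.toNat 0 ≤ stop then pvSkipF f tab n stop (i + 1) else i

-- outer while: one group per iteration (fuel (n-i).toNat is exact)
def pvGroupLoopF : Nat → List Int → Int → Int → List (Int × Int) → List (Int × Int)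
  | 0, _, _, _, output => output
  | f + 1, tab, n, i, output =>
    if i < n then
      let start := tab.getD i.toNat 0
      let stop := start + 1
      let i2 := pvSkipF (n - (i + 1)).toNat tab n stop (i + 1)
      pvGroupLoopF f tab n i2 (output ++ [(start, stop)])
    else output

def do_the_magic (T : List Int) : List (Int × Int) :=
  let n : Int := T.length
  let sortedT := pvQsLoopF (2 * T.length + 1) [(0, n - 1)] T
  pvGroupLoopF T.length sortedT n 0 []

-- ===== PORT B =====
-- _upper_bound(a, x, lo, hi): first index j in [lo, hi] with a[j] > x, by binary search;
-- the Nat argument is fuel making the while-loop structural ((hi-lo).toNat is enough: the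
-- interval halves each step)
def pvUBF : Nat → List Int → Int → Int → Int → Int
  | 0, _, _, lo, _ => lo
  | f + 1, a, x, lo, hi =>
    if lo < hi then
      let mid := PySem.Int.floordiv (lo + hi) 2
      if a.getD mid.toNat 0 ≤ x then pvUBF f a x (mid + 1) hi else pvUBF f a x lo mid
    else lo

-- do_the_magic's while-loop: one group per iteration, the jump computed by _upper_bound
def pvBLoopF : Nat → List Int → Int → Int → List (Int × Int) → List (Int × Int)
  | 0, _, _, _, output => output
  | f + 1, tab, n, i, output =>
    if i < n then
      let start := tab.getD i.toNat 0
      pvBLoopF f tab n (pvUBF (n - (i + 1)).toNat tab (start + 1) (i + 1) n)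
        (output ++ [(start, start + 1)])
    else output

def do_the_magic_alt (T : List Int) : List (Int × Int) :=
  let s := PySem.List.sorted T (fun x => x) false
  let n : Int := s.length
  pvBLoopF s.length s n 0 []

-- ===== PRECONDITION & SPEC =====
def Spec_do_the_magic (T : List Int) (out : List (Int × Int)) : Prop := out = do_the_magic_alt T
instance (T : List Int) (out : List (Int × Int)) : Decidable (Spec_do_the_magic T out) := by unfold Spec_do_the_magic; infer_instance

-- ===== CLAIM (what is proved, stated in full; the proofs are below) =====
def Claim_equal_do_the_magic : Prop := ∀ (T : List Int), Dom_do_the_magic T → Spec_do_the_magic T (do_the_magic T)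

-- ===== LEMMAS AND PROOFS =====

-- ---- proof-side well-founded formulations of the loops (the fuel versions above are
-- proved equal to them, with the fuel shown sufficient) ----
-- i moves up at most once per loop iteration: p ≤ partition(...).2 ≤ r (used by the termination proofs)
theorem pvPartFold_snd_bounds (x : Int) (l : List Int) (s : List Int × Int) :
    s.2 ≤ ((l.foldl (pvPartStep x) s).2) ∧ ((l.foldl (pvPartStep x) s).2) ≤ s.2 + l.length := by
  induction l generalizing s with
  | nil => simp
  | cons a l ih =>
    have h := ih (pvPartStep x s a)
    have : s.2 ≤ (pvPartStep x s a).2 ∧ (pvPartStep x s a).2 ≤ s.2 + 1 := by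
      unfold pvPartStep; split <;> simp
    simp only [List.foldl_cons, List.length_cons] at *
    omega

theorem pvPartition_snd_bounds (tab : List Int) (p r : Int) (h : p < r) :
    p ≤ (pvPartition tab p r).2 ∧ (pvPartition tab p r).2 ≤ r := by
  have hb := pvPartFold_snd_bounds (tab.getD r.toNat 0) (PySem.List.pyRange p r 1) (tab, p - 1)
  have hl : (PySem.List.pyRange p r 1).length = (r - p).toNat := PySem.List.length_pyRange_one p r
  unfold pvPartition
  simp only [hl] at hb ⊢
  omega

def pvQsMeasure (stack : List (Int × Int)) : Nat :=
  (stack.map (fun pr => 2 * (pr.2 - pr.1 + 1).toNat + 1)).sum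

-- qs_iter's while-loop over the explicit stack (push = cons, pop = head: Python appends and pops at the end)
theorem pvQsLoop_dec1 (tab : List Int) (p r : Int) (rest : List (Int × Int)) (h : p < r) :
    pvQsMeasure (((pvPartition tab p r).2 + 1, r) :: (p, (pvPartition tab p r).2 - 1) :: rest) <
      pvQsMeasure ((p, r) :: rest) := by
  have hb := pvPartition_snd_bounds tab p r h
  simp only [pvQsMeasure, List.map_cons, List.sum_cons]
  omega

theorem pvQsLoop_dec2 (p r : Int) (rest : List (Int × Int)) :
    pvQsMeasure rest < pvQsMeasure ((p, r) :: rest) := by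
  simp only [pvQsMeasure, List.map_cons, List.sum_cons]
  omega

def pvQsLoop (stack : List (Int × Int)) (tab : List Int) : List Int :=
  match stack with
  | [] => tab
  | (p, r) :: rest =>
    if h : p < r then
      let s := pvPartition tab p r
      pvQsLoop ((s.2 + 1, r) :: (p, s.2 - 1) :: rest) s.1
    else pvQsLoop rest tab
termination_by pvQsMeasure stack
decreasing_by
  · exact pvQsLoop_dec1 tab p r rest h
  · exact pvQsLoop_dec2 p r rest

-- inner while: i += 1 while i < n and T[i] <= stop
theorem pvSkip_dec (n i : Int) (h : i < n) : (n - (i + 1)).toNat < (n - i).toNat := by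
  omega

def pvSkip (tab : List Int) (n stop i : Int) : Int :=
  if h : i < n ∧ tab.getD i.toNat 0 ≤ stop then pvSkip tab n stop (i + 1) else i
termination_by (n - i).toNat
decreasing_by exact pvSkip_dec n i h.1

theorem pvSkip_ge (tab : List Int) (n stop i : Int) : i ≤ pvSkip tab n stop i := by
  unfold pvSkip
  split
  · rename_i h
    have := pvSkip_ge tab n stop (i + 1); omega
  · omega
termination_by (n - i).toNat
decreasing_by omega

theorem pvGroupLoop_dec (tab : List Int) (n i : Int) (h : i < n) :
    (n - pvSkip tab n (tab.getD i.toNat 0 + 1) (i + 1)).toNat < (n - i).toNat := by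
  have := pvSkip_ge tab n (tab.getD i.toNat 0 + 1) (i + 1)
  omega

-- outer while: one group per iteration
def pvGroupLoop (tab : List Int) (n i : Int) (output : List (Int × Int)) : List (Int × Int) :=
  if h : i < n then
    let start := tab.getD i.toNat 0
    let stop := start + 1
    let i2 := pvSkip tab n stop (i + 1)
    pvGroupLoop tab n i2 (output ++ [(start, stop)])
  else output
termination_by (n - i).toNat
decreasing_by exact pvGroupLoop_dec tab n i h


theorem pvUBMid_bounds (lo hi : Int) (h : lo < hi) :
    lo ≤ PySem.Int.floordiv (lo + hi) 2 ∧ PySem.Int.floordiv (lo + hi) 2 < hi := by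
  rw [PySem.Int.floordiv_eq_ediv_of_pos (by omega)]
  omega

theorem pvUB_dec1 (lo hi : Int) (h : lo < hi) :
    (hi - (PySem.Int.floordiv (lo + hi) 2 + 1)).toNat < (hi - lo).toNat := by
  have := pvUBMid_bounds lo hi h; omega

theorem pvUB_dec2 (lo hi : Int) (h : lo < hi) :
    (PySem.Int.floordiv (lo + hi) 2 - lo).toNat < (hi - lo).toNat := by
  have := pvUBMid_bounds lo hi h; omega

def pvUB (a : List Int) (x : Int) (lo hi : Int) : Int :=
  if h : lo < hi then
    let mid := PySem.Int.floordiv (lo + hi) 2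
    if a.getD mid.toNat 0 ≤ x then pvUB a x (mid + 1) hi else pvUB a x lo mid
  else lo
termination_by (hi - lo).toNat
decreasing_by
  · exact pvUB_dec1 lo hi h
  · exact pvUB_dec2 lo hi h

theorem pvUB_ge (a : List Int) (x : Int) (lo hi : Int) : lo ≤ pvUB a x lo hi := by
  rw [pvUB]
  by_cases h : lo < hi
  · have hm := pvUBMid_bounds lo hi h
    rw [dif_pos h]
    by_cases hc : a.getD (PySem.Int.floordiv (lo + hi) 2).toNat 0 ≤ x
    · rw [if_pos hc]
      have := pvUB_ge a x (PySem.Int.floordiv (lo + hi) 2 + 1) hi; omega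
    · rw [if_neg hc]
      have := pvUB_ge a x lo (PySem.Int.floordiv (lo + hi) 2); omega
  · rw [dif_neg h]
termination_by (hi - lo).toNat
decreasing_by
  · exact pvUB_dec1 lo hi h
  · exact pvUB_dec2 lo hi h

def pvBLoop (tab : List Int) (n i : Int) (output : List (Int × Int)) : List (Int × Int) :=
  if h : i < n then
    let start := tab.getD i.toNat 0
    pvBLoop tab n (pvUB tab (start + 1) (i + 1) n) (output ++ [(start, start + 1)])
  else output
termination_by (n - i).toNat
decreasing_by
  have := pvUB_ge tab (tab.getD i.toNat 0 + 1) (i + 1) n; omega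

-- ---- the fuel versions compute the well-founded versions whenever the fuel suffices ----
theorem pvQsLoopF_eq : ∀ (f : Nat) (stack : List (Int × Int)) (tab : List Int),
    pvQsMeasure stack ≤ f → pvQsLoopF f stack tab = pvQsLoop stack tab := by
  intro f
  induction f with
  | zero =>
    intro stack tab h
    cases stack with
    | nil => rw [pvQsLoopF, pvQsLoop]
    | cons pr rest => simp [pvQsMeasure] at h
  | succ f ih =>
    intro stack tab h
    cases stack with
    | nil => rw [pvQsLoopF, pvQsLoop]
    | cons pr rest =>
      obtain ⟨p, r⟩ := pr
      rw [pvQsLoopF, pvQsLoop]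
      by_cases hpr : p < r
      · rw [if_pos hpr, dif_pos hpr]
        have hd := pvQsLoop_dec1 tab p r rest hpr
        exact ih _ _ (by omega)
      · rw [if_neg hpr, dif_neg hpr]
        have hd := pvQsLoop_dec2 p r rest
        exact ih _ _ (by omega)

theorem pvSkipF_eq : ∀ (f : Nat) (tab : List Int) (n stop i : Int),
    (n - i).toNat ≤ f → pvSkipF f tab n stop i = pvSkip tab n stop i := by
  intro f
  induction f with
  | zero =>
    intro tab n stop i h
    rw [pvSkipF, pvSkip, dif_neg (by omega)]
  | succ f ih =>
    intro tab n stop i h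
    rw [pvSkipF, pvSkip]
    by_cases hc : i < n ∧ tab.getD i.toNat 0 ≤ stop
    · rw [if_pos hc, dif_pos hc]
      exact ih tab n stop (i + 1) (by omega)
    · rw [if_neg hc, dif_neg hc]

theorem pvGroupLoopF_eq : ∀ (f : Nat) (tab : List Int) (n i : Int)
    (output : List (Int × Int)), (n - i).toNat ≤ f →
    pvGroupLoopF f tab n i output = pvGroupLoop tab n i output := by
  intro f
  induction f with
  | zero =>
    intro tab n i output h
    rw [pvGroupLoopF, pvGroupLoop, dif_neg (by omega)]
  | succ f ih =>
    intro tab n i output h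
    rw [pvGroupLoopF, pvGroupLoop]
    by_cases hc : i < n
    · rw [if_pos hc, dif_pos hc]
      dsimp only
      rw [pvSkipF_eq ((n - (i + 1)).toNat) tab n _ (i + 1) (le_refl _)]
      have hge := pvSkip_ge tab n (tab.getD i.toNat 0 + 1) (i + 1)
      exact ih tab n _ _ (by omega)
    · rw [if_neg hc, dif_neg hc]

theorem pvUBF_eq : ∀ (f : Nat) (a : List Int) (x lo hi : Int),
    (hi - lo).toNat ≤ f → pvUBF f a x lo hi = pvUB a x lo hi := by
  intro f
  induction f with
  | zero =>
    intro a x lo hi h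
    rw [pvUBF, pvUB, dif_neg (by omega)]
  | succ f ih =>
    intro a x lo hi h
    rw [pvUBF, pvUB]
    by_cases hc : lo < hi
    · rw [if_pos hc, dif_pos hc]
      have h1 := pvUB_dec1 lo hi hc
      have h2 := pvUB_dec2 lo hi hc
      by_cases hm : a.getD (PySem.Int.floordiv (lo + hi) 2).toNat 0 ≤ x
      · rw [if_pos hm, if_pos hm]
        exact ih _ _ _ _ (by omega)
      · rw [if_neg hm, if_neg hm]
        exact ih _ _ _ _ (by omega)
    · rw [if_neg hc, dif_neg hc]

theorem pvBLoopF_eq : ∀ (f : Nat) (tab : List Int) (n i : Int)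
    (output : List (Int × Int)), (n - i).toNat ≤ f →
    pvBLoopF f tab n i output = pvBLoop tab n i output := by
  intro f
  induction f with
  | zero =>
    intro tab n i output h
    rw [pvBLoopF, pvBLoop, dif_neg (by omega)]
  | succ f ih =>
    intro tab n i output h
    rw [pvBLoopF, pvBLoop]
    by_cases hc : i < n
    · rw [if_pos hc, dif_pos hc]
      dsimp only
      rw [pvUBF_eq ((n - (i + 1)).toNat) tab _ (i + 1) n (le_refl _)]
      have hge := pvUB_ge tab (tab.getD i.toNat 0 + 1) (i + 1) n
      exact ih tab n _ _ (by omega)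
    · rw [if_neg hc, dif_neg hc]


-- ---- the common functional description of the grouping phase ----
def pvGroups (l : List Int) : List (Int × Int) :=
  match l with
  | [] => []
  | v :: rest => (v, v + 1) :: pvGroups (rest.dropWhile (fun w => decide (w ≤ v + 1)))
termination_by l.length
decreasing_by
  have := List.length_dropWhile_le (fun w => decide (w ≤ v + 1)) rest
  simp only [List.length_cons]
  omega

-- ---- basic swap lemmas ----
theorem pvSwap_length (t : List Int) (a b : Nat) : (pvSwap t a b).length = t.length := by
  simp [pvSwap]

theorem pvSwap_getD (t : List Int) (a b k : Nat) (ha : a < t.length) (hb : b < t.length) :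
    (pvSwap t a b).getD k 0 =
      if k = b then t.getD a 0 else if k = a then t.getD b 0 else t.getD k 0 := by
  unfold pvSwap
  by_cases hk : k < t.length
  · rw [List.getD_eq_getElem _ 0 (by simpa using hk)]
    simp only [List.getElem_set]
    split_ifs with h1 h2 h3 h4 h5 <;>
      first
        | omega
        | rfl
        | (rw [List.getD_eq_getElem _ 0 hk])
  · have h1 : ((t.set a (t.getD b 0)).set b (t.getD a 0)).getD k 0 = 0 :=
      List.getD_eq_default _ _ (by simp; omega)
    have h2 : t.getD k 0 = 0 := List.getD_eq_default _ _ (by omega)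
    rw [h1]
    split_ifs <;> omega

theorem pvConsSet_perm (tl : List Int) (m : Nat) (h : m < tl.length) (x : Int) :
    (tl.getD m 0 :: tl.set m x).Perm (x :: tl) := by
  induction tl generalizing m with
  | nil => simp at h
  | cons c rest ih =>
    cases m with
    | zero =>
      simp only [List.getD_cons_zero, List.set_cons_zero]
      exact List.Perm.swap x c rest
    | succ m =>
      have hm : m < rest.length := by simpa using h
      simp only [List.getD_cons_succ, List.set_cons_succ]
      exact ((List.Perm.swap c (rest.getD m 0) (rest.set m x)).trans
        (((ih m hm).cons c).trans (List.Perm.swap x c rest)))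

theorem pvSwap_perm (t : List Int) (a b : Nat) (ha : a < t.length) (hb : b < t.length) :
    (pvSwap t a b).Perm t := by
  induction t generalizing a b with
  | nil => simp at ha
  | cons h tl ih =>
    cases a with
    | zero =>
      cases b with
      | zero => simp [pvSwap]
      | succ m =>
        have hm : m < tl.length := by simpa using hb
        show ((((h :: tl).set 0 ((h :: tl).getD (m+1) 0))).set (m+1) ((h :: tl).getD 0 0)).Perm _
        simp only [List.getD_cons_succ, List.getD_cons_zero, List.set_cons_zero,
          List.set_cons_succ]
        exact pvConsSet_perm tl m hm h
    | succ k =>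
      cases b with
      | zero =>
        have hk : k < tl.length := by simpa using ha
        show ((((h :: tl).set (k+1) ((h :: tl).getD 0 0))).set 0 ((h :: tl).getD (k+1) 0)).Perm _
        simp only [List.getD_cons_succ, List.getD_cons_zero, List.set_cons_succ,
          List.set_cons_zero]
        exact pvConsSet_perm tl k hk h
      | succ m =>
        have hk : k < tl.length := by simpa using ha
        have hm : m < tl.length := by simpa using hb
        show ((((h :: tl).set (k+1) ((h :: tl).getD (m+1) 0))).set (m+1) ((h :: tl).getD (k+1) 0)).Perm _
        simp only [List.getD_cons_succ, List.set_cons_succ]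
        exact (ih k m hk hm).cons h

-- ---- the partition loop invariant ----
theorem pvPartFold_inv (tab : List Int) (p r x : Int) (hp : 0 ≤ p) (hr : r < (tab.length : Int))
    (hx : x = tab.getD r.toNat 0) :
    ∀ (d : Nat) (m : Int), m = p + (d : Int) → m ≤ r →
    ∃ t i, (PySem.List.pyRange p m 1).foldl (pvPartStep x) (tab, p - 1) = (t, i) ∧
      t.length = tab.length ∧ t.Perm tab ∧
      (∀ k : Nat, ((k : Int) < p ∨ m ≤ (k : Int)) → t.getD k 0 = tab.getD k 0) ∧
      (∀ k : Nat, p ≤ (k : Int) → (k : Int) ≤ r →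
        ∃ j : Nat, p ≤ (j : Int) ∧ (j : Int) ≤ r ∧ t.getD k 0 = tab.getD j 0) ∧
      p - 1 ≤ i ∧ i < m ∧
      (∀ k : Nat, p ≤ (k : Int) → (k : Int) ≤ i → t.getD k 0 ≤ x) ∧
      (∀ k : Nat, i < (k : Int) → (k : Int) < m → x < t.getD k 0) := by
  intro d
  induction d with
  | zero =>
    intro m hm _
    refine ⟨tab, p - 1, ?_, rfl, List.Perm.refl _, ?_, ?_, by omega, by omega, ?_, ?_⟩
    · rw [PySem.List.pyRange_one_eq_nil (by omega)]
      simp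
    · intro k _; rfl
    · intro k hk1 hk2; exact ⟨k, hk1, hk2, rfl⟩
    · intro k hk1 hk2; omega
    · intro k hk1 hk2; omega
  | succ d ihd =>
    intro m hm hmr
    obtain ⟨t, i, hfold, hlen, hperm, hun, hreg, hi1, hi2, hle, hgt⟩ :=
      ihd (p + d) (by omega) (by omega)
    have hrange : PySem.List.pyRange p m 1 = PySem.List.pyRange p (p + d) 1 ++ [p + (d : Int)] := by
      have h := PySem.List.pyRange_one_succ_right (show p ≤ p + (d : Int) by omega)
      have hm' : m = p + (d : Int) + 1 := by omega
      rw [hm']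
      exact h
    set m0 : Int := p + (d : Int) with hm0
    rw [hrange, List.foldl_append, hfold]
    simp only [List.foldl_cons, List.foldl_nil]
    unfold pvPartStep
    have hm0r : m0 < r := by omega
    have hm0len : m0 < (t.length : Int) := by omega
    by_cases hcase : t.getD m0.toNat 0 ≤ x
    · rw [if_pos hcase]
      set a : Nat := (i + 1).toNat with hadef
      set b : Nat := m0.toNat with hbdef
      have hai : (a : Int) = i + 1 := by omega
      have hbi : (b : Int) = m0 := by omega
      have halen : a < t.length := by omega
      have hblen : b < t.length := by omega
      have hget := pvSwap_getD t a b
      refine ⟨pvSwap t a b, i + 1, rfl, ?_, ?_, ?_, ?_, by omega, by omega, ?_, ?_⟩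
      · rw [pvSwap_length]; exact hlen
      · exact (pvSwap_perm t a b halen hblen).trans hperm
      · intro k hk
        rw [hget k halen hblen, if_neg (by omega), if_neg (by omega)]
        exact hun k (by omega)
      · intro k hk1 hk2
        rw [hget k halen hblen]
        split_ifs with h1 h2
        · exact hreg a (by omega) (by omega)
        · exact hreg b (by omega) (by omega)
        · exact hreg k hk1 hk2
      · intro k hk1 hk2
        rw [hget k halen hblen]
        split_ifs with h1 h2
        · rw [show a = b by omega]
          exact hcase
        · exact hcase
        · exact hle k hk1 (by omega)
      · intro k hk1 hk2
        rw [hget k halen hblen]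
        split_ifs with h1 h2
        · exact hgt a (by omega) (by omega)
        · omega
        · exact hgt k (by omega) (by omega)
    · rw [if_neg hcase]
      refine ⟨t, i, rfl, hlen, hperm, ?_, hreg, by omega, by omega, hle, ?_⟩
      · intro k hk; exact hun k (by omega)
      · intro k hk1 hk2
        by_cases hk3 : (k : Int) = m0
        · have : k = m0.toNat := by omega
          subst this
          omega
        · exact hgt k hk1 (by omega)

-- ---- the full partition specification ----
theorem pvPartition_spec (tab : List Int) (p r : Int) (hp : 0 ≤ p) (hpr : p < r)
    (hr : r < (tab.length : Int)) :
    ∃ t q, pvPartition tab p r = (t, q) ∧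
      t.length = tab.length ∧ t.Perm tab ∧ p ≤ q ∧ q ≤ r ∧
      (∀ k : Nat, ((k : Int) < p ∨ r < (k : Int)) → t.getD k 0 = tab.getD k 0) ∧
      (∀ k : Nat, p ≤ (k : Int) → (k : Int) ≤ r →
        ∃ j : Nat, p ≤ (j : Int) ∧ (j : Int) ≤ r ∧ t.getD k 0 = tab.getD j 0) ∧
      (∀ k : Nat, p ≤ (k : Int) → (k : Int) < q → t.getD k 0 ≤ t.getD q.toNat 0) ∧
      (∀ k : Nat, q < (k : Int) → (k : Int) ≤ r → t.getD q.toNat 0 ≤ t.getD k 0) := by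
  set x : Int := tab.getD r.toNat 0 with hxdef
  obtain ⟨t, i, hfold, hlen, hperm, hun, hreg, hi1, hi2, hle, hgt⟩ :=
    pvPartFold_inv tab p r x hp hr rfl (r - p).toNat r (by omega) (le_refl r)
  have hunr : t.getD r.toNat 0 = x := by
    rw [hun r.toNat (by omega)]
  set a : Nat := (i + 1).toNat with hadef
  set b : Nat := r.toNat with hbdef
  have hai : (a : Int) = i + 1 := by omega
  have hbi : (b : Int) = r := by omega
  have halen : a < t.length := by omega
  have hblen : b < t.length := by omega
  have hget := pvSwap_getD t a b
  have hqnat : (i + 1).toNat = a := rfl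
  refine ⟨pvSwap t a b, i + 1, ?_, ?_, ?_, by omega, by omega, ?_, ?_, ?_, ?_⟩
  · simp only [pvPartition]
    rw [← hxdef, hfold]
  · rw [pvSwap_length]; exact hlen
  · exact (pvSwap_perm t a b halen hblen).trans hperm
  · intro k hk
    rw [hget k halen hblen, if_neg (by omega), if_neg (by omega)]
    exact hun k (by omega)
  · intro k hk1 hk2
    rw [hget k halen hblen]
    split_ifs with h1 h2
    · exact hreg a (by omega) (by omega)
    · exact hreg b (by omega) (by omega)
    · exact hreg k hk1 hk2
  · -- left fence
    have hpivot : (pvSwap t a b).getD a 0 = x := by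
      rw [hget a halen hblen]
      split_ifs with h1
      · rw [show t.getD a 0 = t.getD b 0 by rw [show a = b by omega]]
        rw [hunr]
      · rw [hunr]
    intro k hk1 hk2
    rw [hqnat, hpivot, hget k halen hblen, if_neg (by omega), if_neg (by omega)]
    exact hle k hk1 (by omega)
  · -- right fence
    have hpivot : (pvSwap t a b).getD a 0 = x := by
      rw [hget a halen hblen]
      split_ifs with h1
      · rw [show t.getD a 0 = t.getD b 0 by rw [show a = b by omega]]
        rw [hunr]
      · rw [hunr]
    intro k hk1 hk2
    rw [hqnat, hpivot, hget k halen hblen]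
    split_ifs with h1 h2
    · have : x < t.getD a 0 := hgt a (by omega) (by omega)
      omega
    · omega
    · have : x < t.getD k 0 := hgt k (by omega) (by omega)
      omega

-- ---- recursive description of the stack loop ----
def pvQsRec (tab : List Int) (p r : Int) : List Int :=
  if h : p < r then
    let s := pvPartition tab p r
    pvQsRec (pvQsRec s.1 (s.2 + 1) r) p (s.2 - 1)
  else tab
termination_by (r - p).toNat
decreasing_by
  · have := pvPartition_snd_bounds tab p r h; omega
  · have := pvPartition_snd_bounds tab p r h; omega

theorem pvQsLoop_eq_rec : ∀ (N : Nat) (p r : Int), (r - p).toNat ≤ N →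
    ∀ (rest : List (Int × Int)) (tab : List Int),
    pvQsLoop ((p, r) :: rest) tab = pvQsLoop rest (pvQsRec tab p r) := by
  intro N
  induction N with
  | zero =>
    intro p r hN rest tab
    have hnot : ¬ p < r := by omega
    rw [pvQsLoop, pvQsRec]
    simp [hnot]
  | succ N ih =>
    intro p r hN rest tab
    by_cases hpr : p < r
    · have hb := pvPartition_snd_bounds tab p r hpr
      rw [pvQsLoop]
      simp only [dif_pos hpr]
      rw [ih ((pvPartition tab p r).2 + 1) r (by omega),
          ih p ((pvPartition tab p r).2 - 1) (by omega)]
      have hunf : pvQsRec tab p r =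
          pvQsRec (pvQsRec (pvPartition tab p r).1 ((pvPartition tab p r).2 + 1) r) p
            ((pvPartition tab p r).2 - 1) := by
        rw [pvQsRec, dif_pos hpr]
      rw [hunf]
    · rw [pvQsLoop, pvQsRec]
      simp [hpr]

-- ---- quicksort correctness ----
theorem pvQsRec_spec : ∀ (N : Nat) (tab : List Int) (p r : Int), (r - p).toNat ≤ N →
    0 ≤ p → r < (tab.length : Int) →
    (pvQsRec tab p r).length = tab.length ∧ (pvQsRec tab p r).Perm tab ∧
    (∀ k : Nat, ((k : Int) < p ∨ r < (k : Int)) → (pvQsRec tab p r).getD k 0 = tab.getD k 0) ∧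
    (∀ k : Nat, p ≤ (k : Int) → (k : Int) ≤ r →
      ∃ j : Nat, p ≤ (j : Int) ∧ (j : Int) ≤ r ∧ (pvQsRec tab p r).getD k 0 = tab.getD j 0) ∧
    (∀ k l : Nat, p ≤ (k : Int) → k ≤ l → (l : Int) ≤ r →
      (pvQsRec tab p r).getD k 0 ≤ (pvQsRec tab p r).getD l 0) := by
  intro N
  induction N with
  | zero =>
    intro tab p r hN hp hr
    have hnot : ¬ p < r := by omega
    rw [pvQsRec, dif_neg hnot]
    refine ⟨rfl, List.Perm.refl _, fun k _ => rfl, fun k hk1 hk2 => ⟨k, hk1, hk2, rfl⟩, ?_⟩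
    intro k l hk hkl hl
    have : k = l := by omega
    subst this
    exact le_refl _
  | succ N ih =>
    intro tab p r hN hp hr
    by_cases hpr : p < r
    · obtain ⟨t1, q, hpart, len1, perm1, hq1, hq2, un1, reg1, fenL, fenR⟩ :=
        pvPartition_spec tab p r hp hpr hr
      have hq0 : 0 ≤ q := by omega
      obtain ⟨len2, perm2, un2, reg2, sort2⟩ :=
        ih t1 (q + 1) r (by omega) (by omega) (by rw [len1]; exact hr)
      obtain ⟨len3, perm3, un3, reg3, sort3⟩ :=
        ih (pvQsRec t1 (q + 1) r) p (q - 1) (by omega) hp (by rw [len2, len1]; omega)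
      have hunfold : pvQsRec tab p r = pvQsRec (pvQsRec t1 (q + 1) r) p (q - 1) := by
        rw [pvQsRec, dif_pos hpr, hpart]
      set t2 : List Int := pvQsRec t1 (q + 1) r with ht2
      set t3 : List Int := pvQsRec t2 p (q - 1) with ht3
      rw [hunfold]
      have hpivot3 : t3.getD q.toNat 0 = t1.getD q.toNat 0 := by
        rw [un3 q.toNat (by omega), un2 q.toNat (by omega)]
      have hleft : ∀ k : Nat, p ≤ (k : Int) → (k : Int) < q →
          t3.getD k 0 ≤ t1.getD q.toNat 0 := by
        intro k hk1 hk2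
        obtain ⟨j1, hj1a, hj1b, hj1⟩ := reg3 k hk1 (by omega)
        rw [hj1, un2 j1 (by omega)]
        exact fenL j1 hj1a (by omega)
      have hright : ∀ k : Nat, q < (k : Int) → (k : Int) ≤ r →
          t1.getD q.toNat 0 ≤ t3.getD k 0 := by
        intro k hk1 hk2
        have h3 : t3.getD k 0 = t2.getD k 0 := un3 k (by omega)
        obtain ⟨j2, hj2a, hj2b, hj2⟩ := reg2 k (by omega) (by omega)
        rw [h3, hj2]
        exact fenR j2 (by omega) (by omega)
      refine ⟨len3.trans (len2.trans len1), (perm3.trans perm2).trans perm1, ?_, ?_, ?_⟩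
      · intro k hk
        rw [un3 k (by omega), un2 k (by omega), un1 k hk]
      · intro k hk1 hk2
        rcases lt_trichotomy ((k : Int)) q with hlt | heq | hgt
        · obtain ⟨j1, hj1a, hj1b, hj1⟩ := reg3 k hk1 (by omega)
          have hu : t2.getD j1 0 = t1.getD j1 0 := un2 j1 (by omega)
          obtain ⟨j, hja, hjb, hj⟩ := reg1 j1 (by omega) (by omega)
          exact ⟨j, hja, hjb, by rw [hj1, hu, hj]⟩
        · have h3 : t3.getD k 0 = t2.getD k 0 := un3 k (by omega)
          have h2 : t2.getD k 0 = t1.getD k 0 := un2 k (by omega)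
          obtain ⟨j, hja, hjb, hj⟩ := reg1 k hk1 hk2
          exact ⟨j, hja, hjb, by rw [h3, h2, hj]⟩
        · have h3 : t3.getD k 0 = t2.getD k 0 := un3 k (by omega)
          obtain ⟨j2, hj2a, hj2b, hj2⟩ := reg2 k (by omega) (by omega)
          obtain ⟨j, hja, hjb, hj⟩ := reg1 j2 (by omega) (by omega)
          exact ⟨j, hja, hjb, by rw [h3, hj2, hj]⟩
      · intro k l hk hkl hl
        by_cases hkq : (k : Int) < q
        · by_cases hlq : (l : Int) < q
          · exact sort3 k l hk hkl (by omega)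
          · by_cases hlq2 : (l : Int) = q
            · rw [show l = q.toNat by omega, hpivot3]
              exact hleft k hk hkq
            · have h1 := hleft k hk hkq
              have h2 := hright l (by omega) hl
              omega
        · by_cases hkq2 : (k : Int) = q
          · by_cases hlq : (l : Int) = q
            · have hkl2 : k = l := by omega
              subst hkl2
              exact le_refl _
            · have h2 := hright l (by omega) hl
              rw [show k = q.toNat by omega, hpivot3]
              exact h2
          · have h3k : t3.getD k 0 = t2.getD k 0 := un3 k (by omega)
            have h3l : t3.getD l 0 = t2.getD l 0 := un3 l (by omega)
            rw [h3k, h3l]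
            exact sort2 k l (by omega) hkl hl
    · have hnot : ¬ p < r := hpr
      rw [pvQsRec, dif_neg hnot]
      refine ⟨rfl, List.Perm.refl _, fun k _ => rfl, fun k hk1 hk2 => ⟨k, hk1, hk2, rfl⟩, ?_⟩
      intro k l hk hkl hl
      have : k = l := by omega
      subst this
      exact le_refl _

-- ---- the grouping loops of A compute pvGroups ----
theorem pvSkip_drop : ∀ (N : Nat) (tab : List Int) (n stop i : Int), (n - i).toNat ≤ N →
    n = (tab.length : Int) → 0 ≤ i →
    0 ≤ pvSkip tab n stop i ∧
    tab.drop (pvSkip tab n stop i).toNat =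
      (tab.drop i.toNat).dropWhile (fun w => decide (w ≤ stop)) := by
  intro N
  induction N with
  | zero =>
    intro tab n stop i hN hn hi
    have hnot : ¬ (i < n ∧ tab.getD i.toNat 0 ≤ stop) := by omega
    rw [pvSkip, dif_neg hnot]
    have hlen : tab.length ≤ i.toNat := by omega
    rw [List.drop_eq_nil_of_le hlen]
    exact ⟨hi, by simp⟩
  | succ N ih =>
    intro tab n stop i hN hn hi
    by_cases hc : i < n ∧ tab.getD i.toNat 0 ≤ stop
    · rw [pvSkip, dif_pos hc]
      have hlt : i.toNat < tab.length := by omega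
      have hdrop : tab.drop i.toNat = tab[i.toNat] :: tab.drop (i.toNat + 1) :=
        List.drop_eq_getElem_cons hlt
      have hgetd : tab.getD i.toNat 0 = tab[i.toNat] := List.getD_eq_getElem _ 0 hlt
      obtain ⟨h1, h2⟩ := ih tab n stop (i + 1) (by omega) hn (by omega)
      have hadd : (i + 1).toNat = i.toNat + 1 := by omega
      rw [hadd] at h2
      refine ⟨h1, ?_⟩
      rw [h2, hdrop, List.dropWhile_cons, if_pos (by rw [← hgetd]; simpa using hc.2)]
    · rw [pvSkip, dif_neg hc]
      refine ⟨hi, ?_⟩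
      by_cases hin : i < n
      · have hlt : i.toNat < tab.length := by omega
        have hdrop : tab.drop i.toNat = tab[i.toNat] :: tab.drop (i.toNat + 1) :=
          List.drop_eq_getElem_cons hlt
        have hgetd : tab.getD i.toNat 0 = tab[i.toNat] := List.getD_eq_getElem _ 0 hlt
        have hgt : ¬ tab.getD i.toNat 0 ≤ stop := by tauto
        rw [hdrop, List.dropWhile_cons, if_neg (by rw [← hgetd]; simpa using hgt)]
      · have : tab.length ≤ i.toNat := by omega
        rw [List.drop_eq_nil_of_le this]
        rfl

theorem pvGroupLoop_groups : ∀ (N : Nat) (tab : List Int) (n i : Int)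
    (out : List (Int × Int)), (n - i).toNat ≤ N → n = (tab.length : Int) → 0 ≤ i →
    pvGroupLoop tab n i out = out ++ pvGroups (tab.drop i.toNat) := by
  intro N
  induction N with
  | zero =>
    intro tab n i out hN hn hi
    have hnot : ¬ i < n := by omega
    rw [pvGroupLoop, dif_neg hnot]
    have : tab.length ≤ i.toNat := by omega
    rw [List.drop_eq_nil_of_le this]
    simp [pvGroups]
  | succ N ih =>
    intro tab n i out hN hn hi
    by_cases hc : i < n
    · rw [pvGroupLoop, dif_pos hc]
      have hlt : i.toNat < tab.length := by omega
      have hdrop : tab.drop i.toNat = tab[i.toNat] :: tab.drop (i.toNat + 1) :=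
        List.drop_eq_getElem_cons hlt
      have hgetd : tab.getD i.toNat 0 = tab[i.toNat] := List.getD_eq_getElem _ 0 hlt
      obtain ⟨hs0, hsdrop⟩ :=
        pvSkip_drop ((n - (i+1)).toNat) tab n (tab.getD i.toNat 0 + 1) (i + 1)
          (le_refl _) hn (by omega)
      have hge := pvSkip_ge tab n (tab.getD i.toNat 0 + 1) (i + 1)
      rw [ih tab n _ _ (by omega) hn hs0]
      rw [hsdrop]
      rw [hdrop, pvGroups, ← hgetd]
      have : (i + 1).toNat = i.toNat + 1 := by omega
      rw [this]
      simp [List.append_assoc]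
    · rw [pvGroupLoop, dif_neg hc]
      have : tab.length ≤ i.toNat := by omega
      rw [List.drop_eq_nil_of_le this]
      simp [pvGroups]

-- ---- binary search: full characterisation of pvUB on a sorted list ----
theorem pvUB_spec : ∀ (N : Nat) (a : List Int) (x lo hi : Int), (hi - lo).toNat ≤ N →
    a.Pairwise (· ≤ ·) → 0 ≤ lo → lo ≤ hi → hi ≤ (a.length : Int) →
    lo ≤ pvUB a x lo hi ∧ pvUB a x lo hi ≤ hi ∧
    (∀ k : Nat, lo ≤ (k : Int) → (k : Int) < pvUB a x lo hi → a.getD k 0 ≤ x) ∧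
    (∀ k : Nat, pvUB a x lo hi ≤ (k : Int) → (k : Int) < hi → x < a.getD k 0) := by
  intro N
  induction N with
  | zero =>
    intro a x lo hi hN hsort h0 hlh hlen
    have hnot : ¬ lo < hi := by omega
    rw [pvUB, dif_neg hnot]
    exact ⟨le_refl _, by omega, fun k h1 h2 => by omega, fun k h1 h2 => by omega⟩
  | succ N ih =>
    intro a x lo hi hN hsort h0 hlh hlen
    by_cases h : lo < hi
    · have hm := pvUBMid_bounds lo hi h
      set mid : Int := PySem.Int.floordiv (lo + hi) 2 with hmid
      have hmlen : mid.toNat < a.length := by omega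
      have hmono : ∀ k l : Nat, k ≤ l → l < a.length → a.getD k 0 ≤ a.getD l 0 := by
        intro k l hkl hl
        rcases eq_or_lt_of_le hkl with rfl | hlt
        · exact le_refl _
        · rw [List.getD_eq_getElem _ 0 (by omega), List.getD_eq_getElem _ 0 hl]
          exact List.pairwise_iff_getElem.mp hsort k l (by omega) hl hlt
      rw [pvUB, dif_pos h]
      rw [← hmid]
      by_cases hc : a.getD mid.toNat 0 ≤ x
      · rw [if_pos hc]
        obtain ⟨r1, r2, r3, r4⟩ := ih a x (mid + 1) hi (by omega) hsort (by omega) (by omega) hlen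
        refine ⟨by omega, r2, ?_, r4⟩
        intro k hk1 hk2
        by_cases hkm : (k : Int) ≤ mid
        · exact le_trans (hmono k mid.toNat (by omega) hmlen) hc
        · exact r3 k (by omega) hk2
      · rw [if_neg hc]
        obtain ⟨r1, r2, r3, r4⟩ := ih a x lo mid (by omega) hsort h0 (by omega) (by omega)
        refine ⟨r1, by omega, r3, ?_⟩
        intro k hk1 hk2
        by_cases hkm : mid ≤ (k : Int)
        · have := hmono mid.toNat k (by omega) (by omega)
          omega
        · exact r4 k hk1 (by omega)
    · rw [pvUB, dif_neg h]
      exact ⟨le_refl _, by omega, fun k h1 h2 => by omega, fun k h1 h2 => by omega⟩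

-- the index characterisation turns into the dropWhile form
theorem pvIdx_drop (a : List Int) (x lo j : Int) (h0 : 0 ≤ lo) (hlj : lo ≤ j)
    (hj : j ≤ (a.length : Int))
    (hle : ∀ k : Nat, lo ≤ (k : Int) → (k : Int) < j → a.getD k 0 ≤ x)
    (hgt : ∀ k : Nat, j ≤ (k : Int) → (k : Int) < (a.length : Int) → x < a.getD k 0) :
    a.drop j.toNat = (a.drop lo.toNat).dropWhile (fun w => decide (w ≤ x)) := by
  obtain ⟨d, hd⟩ : ∃ d : Nat, j = lo + (d : Int) := ⟨(j - lo).toNat, by omega⟩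
  subst hd
  clear hlj
  induction d generalizing lo with
  | zero =>
    simp only [Nat.cast_zero, add_zero] at *
    by_cases hin : lo < (a.length : Int)
    · have hlt : lo.toNat < a.length := by omega
      have hdrop : a.drop lo.toNat = a[lo.toNat] :: a.drop (lo.toNat + 1) :=
        List.drop_eq_getElem_cons hlt
      have hx := hgt lo.toNat (by omega) (by omega)
      rw [List.getD_eq_getElem _ 0 hlt] at hx
      rw [hdrop, List.dropWhile_cons,
        if_neg (by simp only [decide_eq_true_eq]; omega), ← hdrop]
    · rw [List.drop_eq_nil_of_le (by omega)]
      rfl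
  | succ d ihd =>
    have hlt : lo.toNat < a.length := by omega
    have hdrop : a.drop lo.toNat = a[lo.toNat] :: a.drop (lo.toNat + 1) :=
      List.drop_eq_getElem_cons hlt
    have hhead : a.getD lo.toNat 0 ≤ x := hle lo.toNat (by omega) (by push_cast; omega)
    rw [List.getD_eq_getElem _ 0 hlt] at hhead
    rw [hdrop, List.dropWhile_cons,
      if_pos (by simp only [decide_eq_true_eq]; omega)]
    have h1 : ((lo + 1) + (d : Int)).toNat = (lo + ((d + 1 : Nat) : Int)).toNat := by
      push_cast; omega
    have h2 := ihd (lo + 1) (by omega) (by push_cast at hj ⊢; omega)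
      (fun k hk1 hk2 => hle k (by omega) (by push_cast at hk2 ⊢; omega))
      (fun k hk1 hk2 => hgt k (by push_cast at hk1 ⊢; omega) hk2)
    have h3 : (lo + 1).toNat = lo.toNat + 1 := by omega
    rw [h1, h3] at h2
    rw [h2]

-- ---- B's loop computes pvGroups on a sorted list ----
theorem pvBLoop_groups : ∀ (N : Nat) (tab : List Int) (n i : Int)
    (out : List (Int × Int)), (n - i).toNat ≤ N → n = (tab.length : Int) → 0 ≤ i →
    tab.Pairwise (· ≤ ·) →
    pvBLoop tab n i out = out ++ pvGroups (tab.drop i.toNat) := by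
  intro N
  induction N with
  | zero =>
    intro tab n i out hN hn hi hsort
    have hnot : ¬ i < n := by omega
    rw [pvBLoop, dif_neg hnot]
    rw [List.drop_eq_nil_of_le (by omega)]
    simp [pvGroups]
  | succ N ih =>
    intro tab n i out hN hn hi hsort
    by_cases hc : i < n
    · rw [pvBLoop, dif_pos hc]
      have hlt : i.toNat < tab.length := by omega
      have hdrop : tab.drop i.toNat = tab[i.toNat] :: tab.drop (i.toNat + 1) :=
        List.drop_eq_getElem_cons hlt
      have hgetd : tab.getD i.toNat 0 = tab[i.toNat] := List.getD_eq_getElem _ 0 hlt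
      obtain ⟨u1, u2, u3, u4⟩ :=
        pvUB_spec ((n - (i + 1)).toNat) tab (tab.getD i.toNat 0 + 1) (i + 1) n (le_refl _)
          hsort (by omega) (by omega) (by omega)
      have hj : tab.drop (pvUB tab (tab.getD i.toNat 0 + 1) (i + 1) n).toNat =
          (tab.drop (i + 1).toNat).dropWhile
            (fun w => decide (w ≤ tab.getD i.toNat 0 + 1)) :=
        pvIdx_drop tab (tab.getD i.toNat 0 + 1) (i + 1)
          (pvUB tab (tab.getD i.toNat 0 + 1) (i + 1) n) (by omega) u1 (by omega)
          u3 (fun k hk1 hk2 => u4 k hk1 (by omega))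
      rw [ih tab n _ _ (by omega) hn (by omega) hsort]
      rw [hj]
      have hadd : (i + 1).toNat = i.toNat + 1 := by omega
      rw [hadd, hdrop, pvGroups, ← hgetd]
      simp [List.append_assoc]
    · rw [pvBLoop, dif_neg hc]
      rw [List.drop_eq_nil_of_le (by omega)]
      simp [pvGroups]

-- ===== VERDICT (by name: the statement is the Claim_ definition above) =====
theorem do_the_magic_spec : Claim_equal_do_the_magic := by
  intro T _
  unfold Spec_do_the_magic
  have hrec : pvQsLoop [(0, (T.length : Int) - 1)] T = pvQsRec T 0 ((T.length : Int) - 1) := by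
    rw [pvQsLoop_eq_rec (((T.length : Int) - 1 - 0).toNat) 0 ((T.length : Int) - 1)
      (by omega) [] T]
    rw [pvQsLoop]
  obtain ⟨hlen, hperm, -, -, hsorted⟩ :=
    pvQsRec_spec (((T.length : Int) - 1 - 0).toNat) T 0 ((T.length : Int) - 1)
      (by omega) (by omega) (by omega)
  have hpw : (pvQsRec T 0 ((T.length : Int) - 1)).Pairwise (· ≤ ·) := by
    rw [List.pairwise_iff_getElem]
    intro a b ha hb hab
    have h := hsorted a b (by omega) (by omega) (by omega)
    rwa [List.getD_eq_getElem _ 0 ha, List.getD_eq_getElem _ 0 hb] at h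
  have hs : PySem.List.sorted T (fun x => x) false = pvQsRec T 0 ((T.length : Int) - 1) :=
    PySem.List.sorted_id_eq_of_perm_of_pairwise _ _ hperm hpw
  simp only [do_the_magic, do_the_magic_alt]
  rw [pvQsLoopF_eq (2 * T.length + 1) [(0, (T.length : Int) - 1)] T
    (by simp [pvQsMeasure])]
  rw [pvGroupLoopF_eq T.length _ (T.length : Int) 0 [] (by omega)]
  rw [pvBLoopF_eq (PySem.List.sorted T (fun x => x) false).length _ _ 0 [] (by rw [hs, hlen]; omega)]
  rw [hrec, hs, hlen]
  rw [pvGroupLoop_groups ((T.length : Int).toNat) _ _ 0 [] (by omega) (by rw [hlen]) (le_refl 0)]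
  rw [pvBLoop_groups ((T.length : Int).toNat) _ _ 0 [] (by omega) (by rw [hlen]) (le_refl 0) hpw]
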